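-- pv_equiv track=rewrite | github.com/cdccnleo/RQA2025 | production_simulation/src/infrastructure/config/loaders/cloud_loader.py | _parse_cloud_path
-- ===== SOURCE A (Python) =====
-- from typing import Dict, Any, Tuple, Optional, List
--
-- def _parse_cloud_path(path: str) -> Tuple[str, str, str]:
--     """
--     解析云路径
--
--     Args:
--         path: 云路径，如 "aws://parameter/myapp/database/host"
--
--     Returns:
--         Tuple[str, str, str]: (provider, service, path)
--
--     Raises:
--         ValueError: 当路径格式无效时
--     """
--     if not path or not isinstance(path, str):
--         raise ValueError("Invalid cloud path")
--
--     # 检查是否是有效的云路径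
--     valid_prefixes = [
--         "aws://",
--         "azure://",
--         "gcp://",
--         "google://",
--         "consul://",
--         "etcd://",
--         "zookeeper://"
--     ]
--
--     for prefix in valid_prefixes:
--         if path.startswith(prefix):
--             # 移除前缀
--             remaining = path[len(prefix):]
--
--             # 分割服务和路径
--             parts = remaining.split('/', 1)
--             if len(parts) != 2:
--                 raise ValueError(f"Invalid cloud path format: {path}")
--
--             service = parts[0]
--             sub_path = parts[1]
--
--             # 从前缀中提取provider
--             provider = prefix[:-3]  # 移除 "://" 得到provider名称
--
--             return provider, service, sub_path
--
--     raise ValueError(f"Unsupported cloud provider in path: {path}")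
-- ===== SOURCE B (Python) =====
-- from typing import Tuple
--
-- _PROVIDERS = {"aws", "azure", "gcp", "google", "consul", "etcd", "zookeeper"}
--
-- def _parse_cloud_path(path: str) -> Tuple[str, str, str]:
--     if not path or not isinstance(path, str):
--         raise ValueError("Invalid cloud path")
--     provider, sep, rest = path.partition("://")
--     if not sep or provider not in _PROVIDERS:
--         raise ValueError(f"Unsupported cloud provider in path: {path}")
--     service, slash, sub = rest.partition("/")
--     if not slash:
--         raise ValueError(f"Invalid cloud path format: {path}")
--     return provider, service, sub
-- ===== Notes on version B (the rewrite author's own statement) =====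
-- stated objective: idiomatic
-- what changed: Replaces A's loop testing all seven provider prefixes with a single partition at the first scheme separator, a set membership test of the bare provider name, and one partition of the remainder at the first slash.
import Mathlib
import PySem

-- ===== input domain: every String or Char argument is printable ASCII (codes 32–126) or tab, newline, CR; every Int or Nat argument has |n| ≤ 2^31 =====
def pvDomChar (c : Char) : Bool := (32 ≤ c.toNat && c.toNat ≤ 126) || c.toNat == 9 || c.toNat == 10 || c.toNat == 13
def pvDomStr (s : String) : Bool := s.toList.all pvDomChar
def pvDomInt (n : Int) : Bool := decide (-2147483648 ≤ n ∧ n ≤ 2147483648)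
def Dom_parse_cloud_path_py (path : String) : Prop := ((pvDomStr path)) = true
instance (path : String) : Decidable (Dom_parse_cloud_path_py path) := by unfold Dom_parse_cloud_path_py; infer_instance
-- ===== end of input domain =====

-- B replaces A's scan over the seven valid cloud-scheme prefixes by one structural parse:
-- partition at the first scheme separator, one membership test of the bare provider name, then
-- one partition of the remainder at the first slash. Same return value as A on Pre_ (outside
-- Pre_ both raise the same ValueError with the same message).

-- ===== PORT A =====

def pvValidPrefixes : List String :=
  ["aws://", "azure://", "gcp://", "google://", "consul://", "etcd://", "zookeeper://"]

-- A's for-loop over valid_prefixes; [] = the final raise ValueError("Unsupported cloud provider ...")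
def pvALoop (path : String) : List String → String × String × String
  | [] => ("", "", "")
  | pfx :: rest =>
    if PySem.Str.startswith path pfx then
      -- remaining = path[len(prefix):]; parts = remaining.split('/', 1); provider = prefix[:-3]
      match PySem.Str.splitMax? (PySem.Str.slice path (some (PySem.Str.len pfx)) none) "/" 1 with
      | some [service, sub_path] =>
          (PySem.Str.slice pfx none (some (-3)), service, sub_path)
      | _ => ("", "", "")          -- raise ValueError("Invalid cloud path format: ...")
    else pvALoop path rest

def parse_cloud_path_py (path : String) : String × String × String :=
  if path = "" then ("", "", "")   -- raise ValueError("Invalid cloud path")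
  else pvALoop path pvValidPrefixes

-- ===== PORT B =====

def pvProviders : List String := ["aws", "azure", "gcp", "google", "consul", "etcd", "zookeeper"]

-- Python's s.partition(sep) is ported as s.split(sep, 1): the two-piece outcome is the split at
-- the FIRST occurrence of sep (exact), the one-piece outcome means sep is absent.
def parse_cloud_path_py_alt (path : String) : String × String × String :=
  if path = "" then ("", "", "")   -- raise ValueError("Invalid cloud path")
  else
    match PySem.Str.splitMax? path "://" 1 with
    | some [provider, rest] =>
        if pvProviders.contains provider then
          match PySem.Str.splitMax? rest "/" 1 with
          | some [service, sub] => (provider, service, sub)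
          | _ => ("", "", "")
        else ("", "", "")
    | _ => ("", "", "")


-- ===== PRECONDITION & SPEC =====
-- Pre_ admits exactly the inputs on which A returns: path starts with one of the seven valid
-- cloud-scheme prefixes and the part after the prefix contains a slash; on every other input A
-- raises ValueError (so nothing A returns on is excluded).
def Pre_parse_cloud_path_py (path : String) : Prop :=
  ((["aws://", "azure://", "gcp://", "google://", "consul://", "etcd://", "zookeeper://"] : List String).any
    (fun pfx => PySem.Str.startswith path pfx &&
      PySem.Str.isIn "/" (PySem.Str.slice path (some (PySem.Str.len pfx)) none))) = true
instance (path : String) : Decidable (Pre_parse_cloud_path_py path) := by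
  unfold Pre_parse_cloud_path_py; infer_instance

def pvWitness_parse_cloud_path_py : String := "aws://parameter/myapp/database/host"

def Spec_parse_cloud_path_py (path : String) (out : String × String × String) : Prop := out = parse_cloud_path_py_alt path
instance (path : String) (out : String × String × String) : Decidable (Spec_parse_cloud_path_py path out) := by unfold Spec_parse_cloud_path_py; infer_instance

-- ===== CLAIM (what is proved, stated in full; the proofs are below) =====
def Claim_equal_parse_cloud_path_py : Prop := ∀ (path : String), Dom_parse_cloud_path_py path → Pre_parse_cloud_path_py path → Spec_parse_cloud_path_py path (parse_cloud_path_py path)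

-- ===== LEMMAS AND PROOFS =====

lemma pv_go_zero (sep : List Char) (fuel : Nat) (t cur : List Char) (acc : List (List Char)) :
    PySem.Chars.splitOnMax.go sep fuel 0 t cur acc = ((cur.reverse ++ t) :: acc).reverse := by
  cases fuel with
  | zero => simp [PySem.Chars.splitOnMax.go]
  | succ f => cases t with
    | nil => simp [PySem.Chars.splitOnMax.go]
    | cons c r => simp [PySem.Chars.splitOnMax.go]

lemma pv_go_sep (fuel : Nat) (t cur : List Char) (acc : List (List Char)) (hf : 0 < fuel) :
    PySem.Chars.splitOnMax.go [':', '/', '/'] fuel 1 ([':', '/', '/'] ++ t) cur acc =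
      acc.reverse ++ [cur.reverse, t] := by
  cases fuel with
  | zero => omega
  | succ f =>
    simp only [List.cons_append, PySem.Chars.splitOnMax.go]
    norm_num
    simp [pv_go_zero]

lemma pv_go_letters (u : List Char) (hnc : ∀ c ∈ u, c ≠ ':')
    (t cur : List Char) (acc : List (List Char)) : ∀ (fuel : Nat), u.length < fuel →
    PySem.Chars.splitOnMax.go [':', '/', '/'] fuel 1 (u ++ [':', '/', '/'] ++ t) cur acc =
      PySem.Chars.splitOnMax.go [':', '/', '/'] (fuel - u.length) 1 ([':', '/', '/'] ++ t) (u.reverse ++ cur) acc := by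
  induction u generalizing cur with
  | nil => intro fuel h; simp
  | cons c u ih =>
    intro fuel h
    cases fuel with
    | zero => omega
    | succ f =>
      have hc : c ≠ ':' := hnc c (by simp)
      simp only [List.cons_append, PySem.Chars.splitOnMax.go]
      norm_num
      rw [if_neg (by intro hh; exact hc hh.1.symm)]
      have := ih (fun d hd => hnc d (by simp [hd])) (c :: cur) f (by simpa using h)
      rw [show u ++ ':' :: '/' :: '/' :: t = u ++ [':', '/', '/'] ++ t by simp, this]
      congr 1
      omega

lemma pv_splitOnMax_sep (u t : List Char) (hnc : ∀ c ∈ u, c ≠ ':') :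
    PySem.Chars.splitOnMax (u ++ [':', '/', '/'] ++ t) [':', '/', '/'] 1 = [u, t] := by
  unfold PySem.Chars.splitOnMax
  rw [if_neg (by norm_num)]
  have h1 : (1 : Int).toNat = 1 := rfl
  rw [h1, pv_go_letters u hnc t [] [] _ (by simp only [List.length_append, List.length_cons, List.length_nil]; omega),
    pv_go_sep _ _ _ _ (by simp only [List.length_append, List.length_cons, List.length_nil]; omega)]
  simp

lemma pv_strSplit (path : String) (u t : List Char)
    (h : path.toList = u ++ [':', '/', '/'] ++ t) (hnc : ∀ c ∈ u, c ≠ ':') :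
    PySem.Str.splitMax? path "://" 1 = some [String.ofList u, String.ofList t] := by
  unfold PySem.Str.splitMax? PySem.Chars.splitMax?
  rw [show ("://" : String).toList = [':', '/', '/'] from rfl, h,
    if_neg (by norm_num), pv_splitOnMax_sep u t hnc]
  rfl

lemma pv_sw_true (path pfx : String) (t : List Char) (h : path.toList = pfx.toList ++ t) :
    PySem.Str.startswith path pfx = true := by
  unfold PySem.Str.startswith PySem.Chars.startswith
  rw [List.isPrefixOf_iff_prefix, h]
  exact List.prefix_append _ _

lemma pv_sw_false (path q pfx : String) (t : List Char) (h : path.toList = pfx.toList ++ t)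
    (h1 : q.toList.isPrefixOf pfx.toList = false) (h2 : pfx.toList.isPrefixOf q.toList = false) :
    PySem.Str.startswith path q = false := by
  unfold PySem.Str.startswith PySem.Chars.startswith
  rw [Bool.eq_false_iff]
  intro hq
  rw [List.isPrefixOf_iff_prefix, h] at hq
  rcases List.prefix_or_prefix_of_prefix hq (List.prefix_append pfx.toList t) with hc | hc
  · rw [Bool.eq_false_iff] at h1; exact h1 (List.isPrefixOf_iff_prefix.mpr hc)
  · rw [Bool.eq_false_iff] at h2; exact h2 (List.isPrefixOf_iff_prefix.mpr hc)

lemma pv_ne_empty (path : String) (h : path.toList ≠ []) :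
    path ≠ "" := by
  intro he; rw [he] at h; exact h rfl

lemma pv_remaining (path pfx : String) (t : List Char) (h : path.toList = pfx.toList ++ t) :
    PySem.Str.slice path (some (PySem.Str.len pfx)) none = String.ofList t := by
  unfold PySem.Str.slice PySem.Str.len
  rw [PySem.Chars.slice_eq_listSlice, PySem.List.slice_from_natCast, h]
  rw [show pfx.toList.length = (pfx.toList).length from rfl, List.drop_left]

lemma pv_sw_elim (path pfx : String) (h : PySem.Str.startswith path pfx = true) :
    ∃ t, path.toList = pfx.toList ++ t := by
  unfold PySem.Str.startswith PySem.Chars.startswith at h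
  rcases List.isPrefixOf_iff_prefix.mp h with ⟨t, ht⟩
  exact ⟨t, ht.symm⟩

lemma pv_case (path pfx prov : String) (t : List Char)
    (hp : pfx.toList = prov.toList ++ [':', '/', '/'])
    (hnc : prov.toList.all (· != ':') = true)
    (hmem : pvProviders.contains prov = true)
    (hps : PySem.Str.slice pfx none (some (-3)) = prov)
    (h : path.toList = pfx.toList ++ t) :
    (match PySem.Str.splitMax? (PySem.Str.slice path (some (PySem.Str.len pfx)) none) "/" 1 with
     | some [service, sub_path] => (PySem.Str.slice pfx none (some (-3)), service, sub_path)
     | _ => ("", "", "")) = parse_cloud_path_py_alt path := by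
  have hpl : path.toList = prov.toList ++ [':', '/', '/'] ++ t := by
    rw [h, hp, List.append_assoc]
  have hne : path ≠ "" := by
    intro he
    rw [he] at hpl
    exact absurd hpl.symm (by simp)
  have hnc' : ∀ c ∈ prov.toList, c ≠ ':' := by simpa using hnc
  have hs := pv_strSplit path prov.toList t hpl hnc' 
  unfold parse_cloud_path_py_alt
  rw [if_neg hne, hs, pv_remaining path pfx t h, hps]
  simp only [String.ofList_toList, hmem, if_true]

-- ===== VERDICT (by name: the statement is the Claim_ definition above) =====
set_option maxRecDepth 8000 in
theorem parse_cloud_path_py_spec : Claim_equal_parse_cloud_path_py := by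
  intro path _ hpre
  unfold Pre_parse_cloud_path_py at hpre
  simp only [List.any_cons, List.any_nil, Bool.or_eq_true, Bool.and_eq_true, Bool.or_false] at hpre
  unfold Spec_parse_cloud_path_py parse_cloud_path_py
  rcases hpre with ⟨hsw, -⟩ | ⟨hsw, -⟩ | ⟨hsw, -⟩ | ⟨hsw, -⟩ | ⟨hsw, -⟩ | ⟨hsw, -⟩ | ⟨hsw, -⟩
  · rcases pv_sw_elim path "aws://" hsw with ⟨t, ht⟩
    have hne : path ≠ "" := pv_ne_empty path (by rw [ht]; simp)
    rw [if_neg hne]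
    simp only [pvValidPrefixes, pvALoop, pv_sw_true path "aws://" t ht, if_true]
    exact pv_case path "aws://" "aws" t (by decide) (by decide) (by decide) (by decide) ht
  · rcases pv_sw_elim path "azure://" hsw with ⟨t, ht⟩
    have hne : path ≠ "" := pv_ne_empty path (by rw [ht]; simp)
    rw [if_neg hne]
    have e0 : PySem.Str.startswith path "aws://" = false := pv_sw_false path "aws://" "azure://" t ht (by decide) (by decide)
    simp only [pvValidPrefixes, pvALoop, e0, pv_sw_true path "azure://" t ht, Bool.false_eq_true, if_false, if_true]
    exact pv_case path "azure://" "azure" t (by decide) (by decide) (by decide) (by decide) ht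
  · rcases pv_sw_elim path "gcp://" hsw with ⟨t, ht⟩
    have hne : path ≠ "" := pv_ne_empty path (by rw [ht]; simp)
    rw [if_neg hne]
    have e0 : PySem.Str.startswith path "aws://" = false := pv_sw_false path "aws://" "gcp://" t ht (by decide) (by decide)
    have e1 : PySem.Str.startswith path "azure://" = false := pv_sw_false path "azure://" "gcp://" t ht (by decide) (by decide)
    simp only [pvValidPrefixes, pvALoop, e0, e1, pv_sw_true path "gcp://" t ht, Bool.false_eq_true, if_false, if_true]
    exact pv_case path "gcp://" "gcp" t (by decide) (by decide) (by decide) (by decide) ht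
  · rcases pv_sw_elim path "google://" hsw with ⟨t, ht⟩
    have hne : path ≠ "" := pv_ne_empty path (by rw [ht]; simp)
    rw [if_neg hne]
    have e0 : PySem.Str.startswith path "aws://" = false := pv_sw_false path "aws://" "google://" t ht (by decide) (by decide)
    have e1 : PySem.Str.startswith path "azure://" = false := pv_sw_false path "azure://" "google://" t ht (by decide) (by decide)
    have e2 : PySem.Str.startswith path "gcp://" = false := pv_sw_false path "gcp://" "google://" t ht (by decide) (by decide)
    simp only [pvValidPrefixes, pvALoop, e0, e1, e2, pv_sw_true path "google://" t ht, Bool.false_eq_true, if_false, if_true]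
    exact pv_case path "google://" "google" t (by decide) (by decide) (by decide) (by decide) ht
  · rcases pv_sw_elim path "consul://" hsw with ⟨t, ht⟩
    have hne : path ≠ "" := pv_ne_empty path (by rw [ht]; simp)
    rw [if_neg hne]
    have e0 : PySem.Str.startswith path "aws://" = false := pv_sw_false path "aws://" "consul://" t ht (by decide) (by decide)
    have e1 : PySem.Str.startswith path "azure://" = false := pv_sw_false path "azure://" "consul://" t ht (by decide) (by decide)
    have e2 : PySem.Str.startswith path "gcp://" = false := pv_sw_false path "gcp://" "consul://" t ht (by decide) (by decide)
    have e3 : PySem.Str.startswith path "google://" = false := pv_sw_false path "google://" "consul://" t ht (by decide) (by decide)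
    simp only [pvValidPrefixes, pvALoop, e0, e1, e2, e3, pv_sw_true path "consul://" t ht, Bool.false_eq_true, if_false, if_true]
    exact pv_case path "consul://" "consul" t (by decide) (by decide) (by decide) (by decide) ht
  · rcases pv_sw_elim path "etcd://" hsw with ⟨t, ht⟩
    have hne : path ≠ "" := pv_ne_empty path (by rw [ht]; simp)
    rw [if_neg hne]
    have e0 : PySem.Str.startswith path "aws://" = false := pv_sw_false path "aws://" "etcd://" t ht (by decide) (by decide)
    have e1 : PySem.Str.startswith path "azure://" = false := pv_sw_false path "azure://" "etcd://" t ht (by decide) (by decide)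
    have e2 : PySem.Str.startswith path "gcp://" = false := pv_sw_false path "gcp://" "etcd://" t ht (by decide) (by decide)
    have e3 : PySem.Str.startswith path "google://" = false := pv_sw_false path "google://" "etcd://" t ht (by decide) (by decide)
    have e4 : PySem.Str.startswith path "consul://" = false := pv_sw_false path "consul://" "etcd://" t ht (by decide) (by decide)
    simp only [pvValidPrefixes, pvALoop, e0, e1, e2, e3, e4, pv_sw_true path "etcd://" t ht, Bool.false_eq_true, if_false, if_true]
    exact pv_case path "etcd://" "etcd" t (by decide) (by decide) (by decide) (by decide) ht
  · rcases pv_sw_elim path "zookeeper://" hsw with ⟨t, ht⟩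
    have hne : path ≠ "" := pv_ne_empty path (by rw [ht]; simp)
    rw [if_neg hne]
    have e0 : PySem.Str.startswith path "aws://" = false := pv_sw_false path "aws://" "zookeeper://" t ht (by decide) (by decide)
    have e1 : PySem.Str.startswith path "azure://" = false := pv_sw_false path "azure://" "zookeeper://" t ht (by decide) (by decide)
    have e2 : PySem.Str.startswith path "gcp://" = false := pv_sw_false path "gcp://" "zookeeper://" t ht (by decide) (by decide)
    have e3 : PySem.Str.startswith path "google://" = false := pv_sw_false path "google://" "zookeeper://" t ht (by decide) (by decide)
    have e4 : PySem.Str.startswith path "consul://" = false := pv_sw_false path "consul://" "zookeeper://" t ht (by decide) (by decide)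
    have e5 : PySem.Str.startswith path "etcd://" = false := pv_sw_false path "etcd://" "zookeeper://" t ht (by decide) (by decide)
    simp only [pvValidPrefixes, pvALoop, e0, e1, e2, e3, e4, e5, pv_sw_true path "zookeeper://" t ht, Bool.false_eq_true, if_false, if_true]
    exact pv_case path "zookeeper://" "zookeeper" t (by decide) (by decide) (by decide) (by decide) ht
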